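-- pv_equiv track=rewrite | github.com/TejasNN/Python-programs | program7.py | Numbers_frequency
-- ===== SOURCE A (Python) =====
-- def Numbers_frequency(lst, value):
--     unique_ele = []
--     freq_num = {}
--     output_list = []
--     for num in lst:
--         if not num in unique_ele:
--             unique_ele.append(num)
--             freq_num[num] = 1
--         else:
--             freq_num[num] += 1
--
--         if freq_num[num] == value + 1:
--             output_list.append(num)
--
--     return output_list
-- ===== SOURCE B (Python) =====
-- def Numbers_frequency(lst, value):
--     if value < 0:
--         return []
--     positions = {}
--     for i, x in enumerate(lst):
--         positions.setdefault(x, []).append(i)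
--     pairs = [(idxs[value], x) for x, idxs in positions.items() if value < len(idxs)]
--     pairs.sort(key=lambda p: p[0])
--     return [x for _, x in pairs]
-- ===== Notes on version B (the rewrite author's own statement) =====
-- stated objective: faster
-- what changed: Replaces A's single running scan (linear membership test on a uniqueness list per element) with a staged index-table algorithm: build a dict mapping each number to its list of occurrence positions, select the (value+1)-th occurrence index for numbers occurring often enough, then sort these (index, number) pairs by index and output the numbers.
import Mathlib
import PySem

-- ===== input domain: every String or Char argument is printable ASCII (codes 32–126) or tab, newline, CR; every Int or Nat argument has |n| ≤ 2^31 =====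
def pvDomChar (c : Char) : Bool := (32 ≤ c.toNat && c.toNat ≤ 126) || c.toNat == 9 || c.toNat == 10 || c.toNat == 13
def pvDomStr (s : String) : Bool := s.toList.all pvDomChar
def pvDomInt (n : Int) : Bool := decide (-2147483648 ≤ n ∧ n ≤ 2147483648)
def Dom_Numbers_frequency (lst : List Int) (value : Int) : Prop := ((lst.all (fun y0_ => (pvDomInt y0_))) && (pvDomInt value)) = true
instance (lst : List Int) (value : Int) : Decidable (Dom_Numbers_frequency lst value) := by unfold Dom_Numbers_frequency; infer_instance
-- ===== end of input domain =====

-- B replaces A's single running-count scan by a staged index-table algorithm: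
-- a dict of occurrence-position lists, selection of the (value+1)-th occurrence
-- index per number, then a sort of (index, number) pairs (objective: faster; a timing run measured B faster — A's per-element membership scan is quadratic).

-- ===== PORT A =====
-- one loop iteration of A: state = (unique_ele, freq_num, output_list)
def NFstep (value : Int) (st : List Int × PySem.Dict Int Int × List Int) (num : Int) :
    List Int × PySem.Dict Int Int × List Int :=
  let unique := st.1
  let freq := st.2.1
  let out := st.2.2
  let pair :=
    if !(unique.contains num) then (unique ++ [num], freq.insert num 1)
    else (unique, freq.insert num (freq.getD num 0 + 1))
  let out' := if pair.2.getD num 0 == value + 1 then out ++ [num] else out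
  (pair.1, pair.2, out')

def Numbers_frequency (lst : List Int) (value : Int) : List Int :=
  (lst.foldl (NFstep value) ([], PySem.Dict.empty, [])).2.2

-- ===== PORT B =====
def Numbers_frequency_alt (lst : List Int) (value : Int) : List Int :=
  if value < 0 then []
  else
    -- positions[x] = list of indices where x occurs (dict built over (x, i) pairs)
    let positions :=
      ((PySem.List.enumerate lst).map (fun p => (p.2, p.1))).foldl
        (fun d p => d.modify p.1 [] (· ++ [p.2])) PySem.Dict.empty
    -- pairs = [(idxs[value], x) for x, idxs in positions.items() if value < len(idxs)]
    let pairs :=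
      (positions.items.filter (fun q => value < (q.2.length : Int))).map
        (fun q => ((PySem.List.pyGet? q.2 value).getD 0, q.1))
    (PySem.List.sorted pairs (fun r => r.1) false).map (fun r => r.2)

-- ===== PRECONDITION & SPEC =====
def Spec_Numbers_frequency (lst : List Int) (value : Int) (out : List Int) : Prop := out = Numbers_frequency_alt lst value
instance (lst : List Int) (value : Int) (out : List Int) : Decidable (Spec_Numbers_frequency lst value out) := by unfold Spec_Numbers_frequency; infer_instance

-- ===== CLAIM (what is proved, stated in full; the proofs are below) =====
def Claim_equal_Numbers_frequency : Prop := ∀ (lst : List Int) (value : Int), Dom_Numbers_frequency lst value → Spec_Numbers_frequency lst value (Numbers_frequency lst value)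

-- ===== LEMMAS AND PROOFS =====

-- A's output characterized as a filter over enumerate: keep the element at
-- index i iff its count in lst[:i+1] equals value+1.
def NFpref (lst : List Int) (value : Int) : List Int :=
  ((PySem.List.enumerate lst).filter
      (fun p => ((PySem.List.count (PySem.List.slice lst none (some (p.1 + 1))) p.2 : Int) == value + 1))).map (·.2)

-- NFpref on a snoc: the old entries filter the same way, the new entry tests the full count
lemma pref_append_singleton (l : List Int) (x : Int) (v : Int) :
    NFpref (l ++ [x]) v =
      NFpref l v ++
        (if ((l.count x : Int) + 1 == v + 1) then [x] else []) := by
  unfold NFpref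
  rw [PySem.List.enumerate_append, List.filter_append, List.map_append]
  congr 1
  · congr 1
    apply List.filter_congr
    intro p hp
    rcases (PySem.List.mem_enumerate_iff _ _ _).1 hp with ⟨k, hk, rfl⟩
    simp only [zero_add]
    have h1 : ((k : Int) + 1) = ((k + 1 : Nat) : Int) := by push_cast; ring
    rw [h1, PySem.List.slice_to_natCast, PySem.List.slice_to_natCast,
        List.take_append_of_le_length (by omega)]
  · simp only [PySem.List.enumerate_cons, PySem.List.enumerate_nil, List.filter]
    have h1 : ((0 : Int) + (l.length : Int) + 1) = ((l.length + 1 : Nat) : Int) := by push_cast; ring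
    rw [h1, PySem.List.slice_to_natCast, List.take_of_length_le (by simp)]
    simp [List.count_append]
    split <;> simp_all

-- first-occurrence list on a snoc
lemma ofList_snoc (l : List Int) (x : Int) :
    PySem.Set.ofList (l ++ [x]) = if x ∈ l then PySem.Set.ofList l else PySem.Set.ofList l ++ [x] := by
  rw [PySem.Set.ofList_eq_foldl, List.foldl_append]
  simp only [List.foldl_cons, List.foldl_nil, ← PySem.Set.ofList_eq_foldl, PySem.Set.add]
  by_cases hx : x ∈ l
  · rw [if_pos (by simp [PySem.Set.mem_ofList, hx]), if_pos hx]
  · rw [if_neg (by simp [PySem.Set.mem_ofList, hx]), if_neg hx]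

-- A's loop invariant: after processing l the state is
-- (first occurrences of l, counts of l, the filter characterization on l)
lemma loop_inv (v : Int) (l : List Int) :
    (l.foldl (NFstep v) ([], PySem.Dict.empty, [])).1 = PySem.List.dedup l ∧
    (∀ n, (l.foldl (NFstep v) ([], PySem.Dict.empty, [])).2.1.getD n 0 = (l.count n : Int)) ∧
    (l.foldl (NFstep v) ([], PySem.Dict.empty, [])).2.2 = NFpref l v := by
  induction l using List.reverseRecOn with
  | nil =>
      refine ⟨rfl, ?_, rfl⟩
      intro n; simp [PySem.Dict.getD_empty]
  | append_singleton l x ih =>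
      obtain ⟨hu, hf, ho⟩ := ih
      rw [List.foldl_append, List.foldl_cons, List.foldl_nil]
      set st := List.foldl (NFstep v) ([], PySem.Dict.empty, []) l with hst
      by_cases hx : x ∈ l
      · have hmem1 : x ∈ st.1 := by rw [hu]; simpa [PySem.List.mem_dedup] using hx
        have hcont : st.1.contains x = true := by simpa using hmem1
        refine ⟨?_, ?_, ?_⟩
        · simp [NFstep, hu, PySem.List.dedup_eq_ofList, ofList_snoc, hx]
        · intro n
          simp only [NFstep]
          simp only [hcont, Bool.not_true, Bool.false_eq_true, if_false]
          rw [PySem.Dict.getD_insert]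
          by_cases hn : n = x
          · subst hn; simp [hf, List.count_append]
          · simp only [hn, if_false, hf n, List.count_append]
            simp [Ne.symm hn]
        · rw [pref_append_singleton, ← ho]
          simp only [NFstep]
          simp only [hcont, Bool.not_true, Bool.false_eq_true, if_false]
          rw [PySem.Dict.getD_insert_self, hf x]
          split <;> simp
      · have hmem1 : x ∉ st.1 := by rw [hu]; simpa [PySem.List.mem_dedup] using hx
        have hcont : st.1.contains x = false := by simpa using hmem1
        have hc0 : l.count x = 0 := List.count_eq_zero.2 hx
        refine ⟨?_, ?_, ?_⟩
        · simp [NFstep, hu, PySem.List.dedup_eq_ofList, ofList_snoc, hx]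
        · intro n
          simp only [NFstep]
          simp only [hcont, Bool.not_false, if_true]
          rw [PySem.Dict.getD_insert]
          by_cases hn : n = x
          · subst hn; simp [List.count_append, hc0]
          · simp only [hn, if_false, hf n, List.count_append]
            simp [Ne.symm hn]
        · rw [pref_append_singleton, ← ho, hc0]
          simp only [NFstep]
          simp only [hcont, Bool.not_false, if_true]
          rw [PySem.Dict.getD_insert_self]
          split <;> split <;> simp_all

lemma A_eq_pref (lst : List Int) (value : Int) :
    Numbers_frequency lst value = NFpref lst value :=
  (loop_inv value lst).2.2

-- the list of indices (as Ints, increasing) at which x occurs in lst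
def J (lst : List Int) (x : Int) : List Int :=
  ((PySem.List.enumerate lst).filter (fun p => p.2 == x)).map (·.1)

-- the filtered enumerate list underlying NFpref
def Spairs (lst : List Int) (value : Int) : List (Int × Int) :=
  (PySem.List.enumerate lst).filter
      (fun p => ((PySem.List.count (PySem.List.slice lst none (some (p.1 + 1))) p.2 : Int) == value + 1))

lemma J_length (lst : List Int) (x : Int) : (J lst x).length = lst.count x := by
  unfold J
  rw [List.length_map, ← List.countP_eq_length_filter]
  conv_rhs => rw [← PySem.List.map_snd_enumerate lst 0]
  rw [List.count, List.countP_map]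
  rfl

lemma J_snoc (l : List Int) (y x : Int) :
    J (l ++ [y]) x = J l x ++ (if y == x then [(l.length : Int)] else []) := by
  unfold J
  rw [PySem.List.enumerate_append, List.filter_append, List.map_append]
  congr 1
  simp [PySem.List.enumerate_cons, PySem.List.enumerate_nil, List.filter]
  split <;> simp_all

lemma J_getElem? (lst : List Int) (x : Int) (m : Nat) (i : Int) :
    (J lst x)[m]? = some i ↔
      ∃ (k : Nat) (h : k < lst.length), i = (k : Int) ∧ lst[k] = x ∧ (lst.take k).count x = m := by
  induction lst using List.reverseRecOn with
  | nil => simp [J]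
  | append_singleton l y ih =>
      rw [J_snoc]
      constructor
      · intro h
        rcases lt_or_ge m (J l x).length with hm | hm
        · rw [List.getElem?_append_left hm] at h
          obtain ⟨k, hk, rfl, hx, hc⟩ := ih.1 h
          refine ⟨k, by simp; omega, rfl, ?_, ?_⟩
          · rw [List.getElem_append_left hk]; exact hx
          · rw [List.take_append_of_le_length (by omega)]; exact hc
        · rw [List.getElem?_append_right hm] at h
          by_cases hy : (y == x) = true
          · rw [if_pos hy] at h
            rw [List.getElem?_singleton] at h
            split at h
            · obtain hi := Option.some.inj h
              rename_i h0
              refine ⟨l.length, by simp, hi.symm, ?_, ?_⟩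
              · simpa [List.getElem_concat_length] using (beq_iff_eq.1 hy)
              · rw [List.take_append_of_le_length (le_refl _), List.take_length, ← J_length l x]
                omega
            · exact absurd h (by simp)
          · rw [if_neg hy] at h; simp at h
      · rintro ⟨k, hk, rfl, hx, hc⟩
        rcases lt_or_ge k l.length with hkl | hkl
        · rw [List.getElem_append_left hkl] at hx
          rw [List.take_append_of_le_length (by omega)] at hc
          have hmem := ih.2 ⟨k, hkl, rfl, hx, hc⟩
          have hcnt : m < l.count x := by
            have hsplit : l.count x = (l.take k).count x + (l.drop k).count x := by
              conv_lhs => rw [← List.take_append_drop k l]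
              rw [List.count_append]
            have hdrop : l.drop k = l[k] :: l.drop (k + 1) := List.drop_eq_getElem_cons hkl
            rw [hdrop, hx] at hsplit
            simp at hsplit
            omega
          rw [List.getElem?_append_left (by rw [J_length]; omega)]
          exact hmem
        · have hkeq : k = l.length := by simp at hk; omega
          subst hkeq
          have hxy : y = x := by simpa [List.getElem_concat_length] using hx
          rw [List.take_append_of_le_length (le_refl _), List.take_length] at hc
          have hm : m = (J l x).length := by rw [J_length]; omega
          rw [List.getElem?_append_right (by omega), if_pos (by simp [hxy])]
          simp [hm]

lemma count_take_succ (lst : List Int) (k : Nat) (hk : k < lst.length) :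
    (lst.take (k + 1)).count lst[k] = (lst.take k).count lst[k] + 1 := by
  rw [List.take_add_one, List.getElem?_eq_getElem hk, Option.toList_some,
      List.count_append, List.count_singleton]
  simp

lemma mem_Spairs (lst : List Int) (vn : Nat) (p : Int × Int) :
    p ∈ Spairs lst (vn : Int) ↔ (J lst p.2)[vn]? = some p.1 := by
  obtain ⟨i, x⟩ := p
  unfold Spairs
  rw [List.mem_filter, J_getElem?]
  constructor
  · rintro ⟨hmem, hpred⟩
    rcases (PySem.List.mem_enumerate_iff _ _ _).1 hmem with ⟨k, hk, hpe⟩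
    simp only [Prod.mk.injEq, zero_add] at hpe
    obtain ⟨rfl, rfl⟩ := hpe
    have h1 : ((k : Int) + 1) = ((k + 1 : Nat) : Int) := by push_cast; ring
    rw [h1, PySem.List.slice_to_natCast,
        show PySem.List.count (lst.take (k+1)) lst[k] = (lst.take (k+1)).count lst[k] from rfl,
        count_take_succ lst k hk] at hpred
    have hcv : (((lst.take k).count lst[k] + 1 : Nat) : Int) = (vn : Int) + 1 := by
      exact_mod_cast (beq_iff_eq.1 hpred)
    refine ⟨k, hk, rfl, rfl, ?_⟩
    show (lst.take k).count lst[k] = vn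
    omega
  · rintro ⟨k, hk, rfl, rfl, hc⟩
    refine ⟨(PySem.List.mem_enumerate_iff _ _ _).2 ⟨k, hk, by simp⟩, ?_⟩
    have h1 : ((k : Int) + 1) = ((k + 1 : Nat) : Int) := by push_cast; ring
    rw [h1, PySem.List.slice_to_natCast,
        show PySem.List.count (lst.take (k+1)) ((k : Int), lst[k]).2 = (lst.take (k+1)).count lst[k] from rfl,
        count_take_succ lst k hk]
    have hc' : (lst.take k).count lst[k] = vn := hc
    simp; omega

lemma Spairs_pairwise (lst : List Int) (value : Int) :
    (Spairs lst value).Pairwise (fun a b => a.1 < b.1) :=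
  (PySem.List.pairwise_lt_enumerate lst 0).filter _

lemma positions_getD (lst : List Int) (x : Int) :
    (((PySem.List.enumerate lst).map (fun p => (p.2, p.1))).foldl
        (fun d p => d.modify p.1 [] (· ++ [p.2])) PySem.Dict.empty).getD x [] = J lst x := by
  rw [PySem.Dict.getD_foldl_modify_append, PySem.Dict.getD_empty]
  simp [List.filter_map, List.map_map, Function.comp_def, J]

lemma positions_keys (lst : List Int) :
    (((PySem.List.enumerate lst).map (fun p => (p.2, p.1))).foldl
        (fun d p => d.modify p.1 [] (· ++ [p.2])) PySem.Dict.empty).keys = PySem.List.dedup lst := by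
  rw [show (List.foldl (fun d p => d.modify p.1 [] fun x => x ++ [p.2]) PySem.Dict.empty
        ((PySem.List.enumerate lst).map (fun p => (p.2, p.1)))).keys
      = PySem.Set.update (PySem.Dict.empty : PySem.Dict Int (List Int)).keys
          (((PySem.List.enumerate lst).map (fun p => (p.2, p.1))).map (fun p => p.1)) from
    PySem.Dict.keys_foldl_modify_key ((PySem.List.enumerate lst).map (fun p => (p.2, p.1)))
      (fun p : Int × Int => p.1) ([] : List Int) (fun _ p v => v ++ [p.2]) PySem.Dict.empty]
  rw [List.map_map, show ((fun (p : Int × Int) => p.1) ∘ fun p => (p.2, p.1)) = (fun (p : Int × Int) => p.2) from rfl,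
      PySem.List.map_snd_enumerate]
  rw [PySem.List.dedup_eq_ofList, PySem.Set.ofList_eq_foldl]
  rfl

lemma positions_items (lst : List Int) :
    (((PySem.List.enumerate lst).map (fun p => (p.2, p.1))).foldl
        (fun d p => d.modify p.1 [] (· ++ [p.2])) PySem.Dict.empty).items
      = (PySem.List.dedup lst).map (fun k => (k, J lst k)) := by
  rw [PySem.Dict.items_eq_map_keys _ (by
        apply PySem.Dict.nodup_keys_foldl_modify_key
        simp [PySem.Dict.empty]) ([] : List Int), positions_keys]
  exact List.map_congr_left (fun k _ => by rw [positions_getD])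

lemma pairs_char (lst : List Int) (vn : Nat) :
    ((((PySem.List.enumerate lst).map (fun p => (p.2, p.1))).foldl
        (fun d p => d.modify p.1 [] (· ++ [p.2])) PySem.Dict.empty).items.filter
          (fun q => ((vn : Int)) < (q.2.length : Int))).map
        (fun q => ((PySem.List.pyGet? q.2 (vn : Int)).getD 0, q.1))
      = ((PySem.List.dedup lst).filter (fun x => ((vn : Int)) < ((J lst x).length : Int))).map
          (fun x => ((PySem.List.pyGet? (J lst x) (vn : Int)).getD 0, x)) := by
  rw [positions_items, List.filter_map, List.map_map]
  rfl

lemma Spairs_perm_pairs (lst : List Int) (vn : Nat) :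
    (Spairs lst (vn : Int)).Perm
      (((PySem.List.dedup lst).filter (fun x => ((vn : Int)) < ((J lst x).length : Int))).map
          (fun x => ((PySem.List.pyGet? (J lst x) (vn : Int)).getD 0, x))) := by
  have hnd1 : (Spairs lst (vn : Int)).Nodup :=
    (Spairs_pairwise lst (vn : Int)).imp (fun hlt => by intro he; rw [he] at hlt; exact lt_irrefl _ hlt)
  have hnd2 : ((((PySem.List.dedup lst).filter (fun x => ((vn : Int)) < ((J lst x).length : Int)))).map
          (fun x => ((PySem.List.pyGet? (J lst x) (vn : Int)).getD 0, x))).Nodup := by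
    apply List.Nodup.map
    · intro a b h; exact congrArg Prod.snd h
    · exact (PySem.List.nodup_dedup lst).filter _
  rw [List.perm_ext_iff_of_nodup hnd1 hnd2]
  intro p
  rw [mem_Spairs, List.mem_map]
  constructor
  · intro h
    obtain ⟨hlen, hval⟩ := List.getElem?_eq_some_iff.1 h
    obtain ⟨k, hk, _, hkx, _⟩ := (J_getElem? lst p.2 vn p.1).1 h
    refine ⟨p.2, List.mem_filter.2 ⟨?_, ?_⟩, ?_⟩
    · exact (PySem.List.mem_dedup _ _).2 (hkx ▸ List.getElem_mem hk)
    · simp only [decide_eq_true_eq]; exact_mod_cast hlen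
    · rw [PySem.List.pyGet?_natCast, List.getElem?_eq_getElem hlen, Option.getD_some, hval]
  · rintro ⟨x, hxf, rfl⟩
    obtain ⟨hxd, hlenb⟩ := List.mem_filter.1 hxf
    have hlen : vn < (J lst x).length := by
      simp only [decide_eq_true_eq] at hlenb; exact_mod_cast hlenb
    simp only [PySem.List.pyGet?_natCast, List.getElem?_eq_getElem hlen, Option.getD_some]

lemma pref_eq_alt (lst : List Int) (value : Int) :
    NFpref lst value = Numbers_frequency_alt lst value := by
  unfold Numbers_frequency_alt
  by_cases hv : value < 0
  · rw [if_pos hv]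
    unfold NFpref
    rw [List.filter_eq_nil_iff.2 ?_, List.map_nil]
    intro p hp
    rcases (PySem.List.mem_enumerate_iff _ _ _).1 hp with ⟨k, hk, hpe⟩
    simp only [zero_add] at hpe
    obtain ⟨rfl, rfl⟩ := hpe
    have h1 : ((k : Int) + 1) = ((k + 1 : Nat) : Int) := by push_cast; ring
    rw [h1, PySem.List.slice_to_natCast,
        show PySem.List.count (lst.take (k+1)) ((k : Int), lst[k]).2 = (lst.take (k+1)).count lst[k] from rfl,
        count_take_succ lst k hk]
    simp only [beq_iff_eq]
    intro hco
    omega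
  · obtain ⟨vn, rfl⟩ : ∃ vn : Nat, value = (vn : Int) :=
      ⟨value.toNat, (Int.toNat_of_nonneg (not_lt.1 hv)).symm⟩
    simp only [if_neg hv]
    rw [pairs_char]
    rw [PySem.List.sorted_eq_of_perm_of_pairwise_lt _ _ _ (Spairs_perm_pairs lst vn)
      (Spairs_pairwise lst (vn : Int))]
    rfl

-- ===== VERDICT (by name: the statement is the Claim_ definition above) =====
theorem Numbers_frequency_spec : Claim_equal_Numbers_frequency := by
  intro lst value _
  unfold Spec_Numbers_frequency
  rw [A_eq_pref, pref_eq_alt]
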